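-- pv_equiv track=rewrite | github.com/hglunz1/Project-Euler-Solutions | phi_fun.py | phi_counting
-- ===== SOURCE A (Python) =====
-- def gcd(p,q):
--     while q != 0:
--         p, q = q, p%q
--     return p
--
-- def is_coprime(x, y):
--     return gcd(x, y) == 1
--
-- def phi_func(x):
--     if x == 1:
--         return 1
--     else:
--         n = [y for y in range(1,x) if is_coprime(x,y)]
--         return len(n)
--
-- def phi_counting(x,y):
--     list = []
--     n = 0
--     while len(list) < y and n<x**2:
--         if x == phi_func(n):
--             list.append(n)
--         n = n+1
--     return(list)
-- ===== SOURCE B (Python) =====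
-- def phi_counting(x, y):
--     # totient via sqrt(n) trial-division factorization instead of gcd-counting
--     def phi(n):
--         result = n
--         m = n
--         for p in range(2, n + 1):
--             if p * p > m:
--                 break
--             if m % p == 0:
--                 result -= result // p
--                 while m % p == 0:
--                     m //= p
--         if m > 1:
--             result -= result // m
--         return result
--
--     out = []
--     for n in range(x * x):
--         if len(out) >= y:
--             break
--         if phi(n) == x:
--             out.append(n)
--     return out
-- ===== Notes on version B (the rewrite author's own statement) =====
-- stated objective: faster
-- what changed: B computes each totient by sqrt(n) trial-division prime factorization (result -= result//p per prime factor) instead of A's counting of coprime residues via a gcd over every y in range(1,n), removing an O(n log n) inner scan per candidate.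
import Mathlib
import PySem

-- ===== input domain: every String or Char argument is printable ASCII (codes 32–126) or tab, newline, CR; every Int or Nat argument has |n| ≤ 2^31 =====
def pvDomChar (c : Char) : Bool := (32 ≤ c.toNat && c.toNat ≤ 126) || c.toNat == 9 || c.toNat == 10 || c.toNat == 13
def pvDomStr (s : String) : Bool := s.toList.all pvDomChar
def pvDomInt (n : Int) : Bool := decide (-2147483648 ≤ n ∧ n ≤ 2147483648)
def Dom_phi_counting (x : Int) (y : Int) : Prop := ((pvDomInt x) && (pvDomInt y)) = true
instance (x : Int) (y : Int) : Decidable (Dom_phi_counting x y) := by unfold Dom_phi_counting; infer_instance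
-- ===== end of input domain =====

-- B computes the totient by √n trial-division factorization instead of A's gcd-count over
-- all residues, making the whole search asymptotically faster; return values are identical.

-- ===== PORT A =====
-- while q != 0: p, q = q, p % q
def gcdA (p q : Int) : Int :=
  if hq : q = 0 then p
  else gcdA q (PySem.Int.mod p q)
termination_by q.natAbs
decreasing_by
  rcases lt_trichotomy q 0 with h | h | h
  · have := PySem.Int.mod_neg_bounds p h
    omega
  · exact absurd h hq
  · have h1 := PySem.Int.mod_nonneg p h
    have h2 := PySem.Int.mod_lt p h
    omega

def is_coprimeA (x y : Int) : Bool := gcdA x y == 1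

def phi_funcA (x : Int) : Int :=
  if x = 1 then 1
  else ((PySem.List.pyRange 1 x 1).filter (fun y => is_coprimeA x y)).length

-- while len(list) < y and n < x**2: …  (x**2 ported as x * x, exact for int squaring)
def loopA (x y : Int) (acc : List Int) (n : Int) : List Int :=
  if h : (acc.length : Int) < y ∧ n < x * x then
    loopA x y (if x = phi_funcA n then acc ++ [n] else acc) (n + 1)
  else acc
termination_by (x * x - n).toNat
decreasing_by omega

def phi_counting (x : Int) (y : Int) : List Int := loopA x y [] 0

-- ===== PORT B =====
-- inner 'while m % p == 0: m //= p'; the '2 ≤ p ∧ 0 < m' conjuncts only make the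
-- recursion total (they hold whenever the Python loop runs) — same values computed
def phiDivB (m p : Int) : Int :=
  if h : 2 ≤ p ∧ 0 < m ∧ PySem.Int.mod m p = 0 then phiDivB (PySem.Int.floordiv m p) p else m
termination_by m.toNat
decreasing_by
  have hp : 0 < p := by omega
  rw [PySem.Int.floordiv_eq_ediv_of_pos hp]
  have h1 : 0 ≤ m / p := Int.ediv_nonneg (by omega) (by omega)
  have h2 : m / p < m := by
    rw [Int.ediv_lt_iff_lt_mul hp]
    nlinarith [h.2.1]
  omega

-- for p in range(2, n+1): if p*p > m: break; if m % p == 0: result -= result//p; divide out p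
-- (range(2, n+1) is a lazy iterator in Python 3, ported as a counter with its bound)
def phiLoopB (result m p bound : Int) : Int × Int :=
  if hp : p < bound then
    if m < p * p then (result, m)
    else if PySem.Int.mod m p = 0 then
      phiLoopB (result - PySem.Int.floordiv result p) (phiDivB m p) (p + 1) bound
    else phiLoopB result m (p + 1) bound
  else (result, m)
termination_by (bound - p).toNat
decreasing_by all_goals omega

def phiB (n : Int) : Int :=
  let rm := phiLoopB n n 2 (n + 1)
  if 1 < rm.2 then rm.1 - PySem.Int.floordiv rm.1 rm.2 else rm.1

-- for n in range(x*x): if len(out) >= y: break; if phi(n) == x: out.append(n)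
-- (again a lazy range, ported as a counter with its bound)
def loopB (x y : Int) (acc : List Int) (n bound : Int) : List Int :=
  if hn : n < bound then
    if y ≤ (acc.length : Int) then acc
    else loopB x y (if phiB n = x then acc ++ [n] else acc) (n + 1) bound
  else acc
termination_by (bound - n).toNat
decreasing_by omega

def phi_counting_alt (x : Int) (y : Int) : List Int :=
  loopB x y [] 0 (x * x)

-- ===== PRECONDITION & SPEC =====
def Spec_phi_counting (x : Int) (y : Int) (out : List Int) : Prop := out = phi_counting_alt x y
instance (x : Int) (y : Int) (out : List Int) : Decidable (Spec_phi_counting x y out) := by unfold Spec_phi_counting; infer_instance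

-- ===== CLAIM (what is proved, stated in full; the proofs are below) =====
def Claim_equal_phi_counting : Prop := ∀ (x : Int) (y : Int), Dom_phi_counting x y → Spec_phi_counting x y (phi_counting x y)

-- ===== LEMMAS AND PROOFS =====

-- A-side: the Euclid port equals Nat.gcd on nonnegative inputs
theorem gcdA_natCast (b a : Nat) : gcdA (a : Int) (b : Int) = (Nat.gcd a b : Int) := by
  induction b using Nat.strong_induction_on generalizing a with
  | _ b ih =>
    rw [gcdA]
    by_cases hb : b = 0
    · subst hb; simp
    · have hb' : 0 < b := Nat.pos_of_ne_zero hb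
      rw [dif_neg (by exact_mod_cast hb)]
      rw [show PySem.Int.mod (a : Int) (b : Int) = ((a % b : Nat) : Int) from PySem.Int.mod_natCast a b]
      rw [ih (a % b) (Nat.mod_lt a hb')]
      rw [Nat.gcd_comm b, ← Nat.gcd_rec, Nat.gcd_comm]

-- A-side: phi_funcA computes the totient
theorem totient_countP (N : Nat) (h2 : 2 ≤ N) :
    (List.range (N - 1)).countP (fun k => Nat.gcd N (1 + k) == 1) = Nat.totient N := by
  obtain ⟨M, rfl⟩ : ∃ M, N = M + 1 := ⟨N - 1, by omega⟩
  rw [Nat.totient_eq_card_coprime, ← Nat.count_eq_card_filter_range, Nat.count,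
    List.range_succ_eq_map, List.countP_cons, List.countP_map, Nat.add_sub_cancel]
  have h0 : (decide ((M + 1).Coprime 0)) = false := by
    simp only [Nat.coprime_zero_right, decide_eq_false_iff_not]
    omega
  rw [h0, if_neg (by simp), Nat.add_zero]
  apply List.countP_congr
  intro k _
  by_cases h : Nat.gcd (M + 1) (1 + k) = 1
  · simp [Function.comp, Nat.Coprime, Nat.add_comm 1 k]
  · simp [Function.comp, Nat.Coprime, Nat.add_comm 1 k]

theorem phi_funcA_totient (n : Int) (hn : 0 ≤ n) : phi_funcA n = (Nat.totient n.toNat : Int) := by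
  obtain ⟨N, rfl⟩ := Int.eq_ofNat_of_zero_le hn
  rw [Int.toNat_natCast]
  unfold phi_funcA
  by_cases h1 : (N : Int) = 1
  · rw [if_pos h1]
    have : N = 1 := by exact_mod_cast h1
    rw [this]
    rfl
  rw [if_neg h1]
  by_cases h0 : N = 0
  · subst h0
    rw [PySem.List.pyRange_one_eq_nil (by norm_num)]
    rfl
  have h2 : 2 ≤ N := by
    rcases Nat.lt_or_ge N 2 with h | h
    · interval_cases N
      · exact absurd rfl h0
      · exact absurd rfl (by exact_mod_cast h1)
    · exact h
  rw [PySem.List.pyRange_one, show ((N : Int) - 1).toNat = N - 1 by omega,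
    ← List.countP_eq_length_filter, List.countP_map]
  rw [List.countP_congr (q := fun k => Nat.gcd N (1 + k) == 1) ?_]
  · exact_mod_cast congrArg (Nat.cast : Nat → Int) (totient_countP N h2)
  · intro k _
    have hAB : is_coprimeA (N : Int) ((1 : Int) + (k : Int)) = (Nat.gcd N (1 + k) == 1) := by
      unfold is_coprimeA
      rw [show (1 : Int) + (k : Int) = ((1 + k : Nat) : Int) by push_cast; ring,
        gcdA_natCast]
      by_cases h : Nat.gcd N (1 + k) = 1
      · simp [h]
      · simp [h, show ((Nat.gcd N (1 + k) : Nat) : Int) ≠ 1 by exact_mod_cast h]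
    simp only [Function.comp_apply]
    rw [hAB]

-- B-side Nat mirrors
def phiDivN (m p : Nat) : Nat :=
  if h : 2 ≤ p ∧ 0 < m ∧ m % p = 0 then phiDivN (m / p) p else m
termination_by m
decreasing_by exact Nat.div_lt_self h.2.1 (by omega)

def phiLoopN (result m : Nat) (ps : List Nat) : Nat × Nat :=
  match ps with
  | [] => (result, m)
  | p :: rest =>
    if m < p * p then (result, m)
    else if m % p = 0 then phiLoopN (result - result / p) (phiDivN m p) rest
    else phiLoopN result m rest

theorem phiDivB_natCast (m p : Nat) : phiDivB (m : Int) (p : Int) = (phiDivN m p : Int) := by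
  induction m using Nat.strong_induction_on with
  | _ m ih =>
    rw [phiDivB, phiDivN]
    by_cases h : 2 ≤ p ∧ 0 < m ∧ m % p = 0
    · have hInt : 2 ≤ (p : Int) ∧ 0 < (m : Int) ∧ PySem.Int.mod (m : Int) (p : Int) = 0 := by
        refine ⟨by exact_mod_cast h.1, by exact_mod_cast h.2.1, ?_⟩
        rw [PySem.Int.mod_natCast]; exact_mod_cast h.2.2
      rw [dif_pos hInt, dif_pos h]
      rw [show PySem.Int.floordiv (m : Int) (p : Int) = ((m / p : Nat) : Int) from PySem.Int.floordiv_natCast m p]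
      exact ih (m / p) (Nat.div_lt_self h.2.1 (by omega))
    · have hInt : ¬(2 ≤ (p : Int) ∧ 0 < (m : Int) ∧ PySem.Int.mod (m : Int) (p : Int) = 0) := by
        rw [PySem.Int.mod_natCast]
        intro hc
        exact h ⟨by exact_mod_cast hc.1, by exact_mod_cast hc.2.1, by exact_mod_cast hc.2.2⟩
      rw [dif_neg hInt, dif_neg h]

theorem phiLoopB_natCast (k : Nat) : ∀ (P r m : Nat),
    phiLoopB (r : Int) (m : Int) (P : Int) ((P + k : Nat) : Int) =
      (((phiLoopN r m (List.range' P k)).1 : Int), ((phiLoopN r m (List.range' P k)).2 : Int)) := by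
  induction k with
  | zero =>
    intro P r m
    rw [phiLoopB, dif_neg (by push_cast; omega)]
    rfl
  | succ k ih =>
    intro P r m
    rw [List.range'_succ, phiLoopB, dif_pos (by push_cast; omega)]
    simp only [phiLoopN]
    by_cases hbrk : m < P * P
    · rw [if_pos (by exact_mod_cast hbrk), if_pos hbrk]
    · rw [if_neg (by exact_mod_cast hbrk), if_neg hbrk]
      have hbound : ((P + (k + 1) : Nat) : Int) = (((P + 1) + k : Nat) : Int) := by push_cast; ring
      by_cases hdvd : m % P = 0
      · rw [if_pos (by rw [PySem.Int.mod_natCast]; exact_mod_cast hdvd), if_pos hdvd]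
        rw [show PySem.Int.floordiv (r : Int) (P : Int) = ((r / P : Nat) : Int) from PySem.Int.floordiv_natCast r P]
        rw [phiDivB_natCast]
        rw [show (r : Int) - ((r / P : Nat) : Int) = ((r - r / P : Nat) : Int) by
          have := Nat.div_le_self r P; push_cast [this]; ring]
        rw [show ((P : Int) + 1) = ((P + 1 : Nat) : Int) by push_cast; ring, hbound]
        exact ih (P + 1) (r - r / P) (phiDivN m P)
      · rw [if_neg (by rw [PySem.Int.mod_natCast]; exact_mod_cast hdvd), if_neg hdvd]
        rw [show ((P : Int) + 1) = ((P + 1 : Nat) : Int) by push_cast; ring, hbound]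
        exact ih (P + 1) r m

-- the factorization invariant
theorem phiDivN_spec (p : Nat) (hp : 2 ≤ p) : ∀ m, 0 < m →
    ∃ e, m = p ^ e * phiDivN m p ∧ ¬ p ∣ phiDivN m p ∧ 0 < phiDivN m p := by
  intro m
  induction m using Nat.strong_induction_on with
  | _ m ih =>
    intro hm
    rw [phiDivN]
    by_cases h : 2 ≤ p ∧ 0 < m ∧ m % p = 0
    · rw [dif_pos h]
      have hdvd : p ∣ m := Nat.dvd_of_mod_eq_zero h.2.2
      have hlt : m / p < m := Nat.div_lt_self hm (by omega)
      have hpos : 0 < m / p := Nat.div_pos (Nat.le_of_dvd hm hdvd) (by omega)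
      obtain ⟨e, he, hnd, hp0⟩ := ih (m / p) hlt hpos
      set d := phiDivN (m / p) p with hd
      refine ⟨e + 1, ?_, hnd, hp0⟩
      calc m = p * (m / p) := (Nat.mul_div_cancel' hdvd).symm
        _ = p * (p ^ e * d) := by rw [he]
        _ = p ^ (e + 1) * d := by ring
    · rw [dif_neg h]
      refine ⟨0, by ring, ?_, hm⟩
      intro hdvd
      exact h ⟨hp, hm, Nat.mod_eq_zero_of_dvd hdvd⟩

theorem phiLoopN_correct : ∀ (k p c m : Nat), 2 ≤ p → 0 < m → m < p + k → 0 < c →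
    (∀ q, q.Prime → q ∣ m → p ≤ q) → (∀ q, q.Prime → q ∣ c → q < p) →
    (if 1 < (phiLoopN (c.totient * m) m (List.range' p k)).2 then
       (phiLoopN (c.totient * m) m (List.range' p k)).1 -
         (phiLoopN (c.totient * m) m (List.range' p k)).1 /
           (phiLoopN (c.totient * m) m (List.range' p k)).2
     else (phiLoopN (c.totient * m) m (List.range' p k)).1) = (c * m).totient := by
  intro k
  induction k with
  | zero =>
    intro p c m hp hm hmk hc hqm hqc
    have hm1 : m = 1 := by
      by_contra hne
      have hq := Nat.minFac_prime hne
      have h1 := hqm m.minFac hq (Nat.minFac_dvd m)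
      have h2 := Nat.minFac_le hm
      omega
    subst hm1
    simp [phiLoopN]
  | succ k ih =>
    intro p c m hp hm hmk hc hqm hqc
    rw [List.range'_succ]
    by_cases hbrk : m < p * p
    · simp only [phiLoopN, if_pos hbrk]
      by_cases hm1 : m = 1
      · subst hm1; simp
      · -- m is prime: all its prime factors are ≥ p and m < p*p
        have hq := Nat.minFac_prime hm1
        have hqd : m.minFac ∣ m := Nat.minFac_dvd m
        have hpq : p ≤ m.minFac := hqm m.minFac hq hqd
        have hmqr : m = m.minFac * (m / m.minFac) := (Nat.mul_div_cancel' hqd).symm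
        have hr0 : 0 < m / m.minFac := Nat.div_pos (Nat.minFac_le hm) (Nat.minFac_pos m)
        have hmprime : m.Prime := by
          by_cases hr1 : m / m.minFac = 1
          · rw [hr1, mul_one] at hmqr; rw [hmqr]; exact hq
          · exfalso
            have hrp := Nat.minFac_prime hr1
            have hrd : (m / m.minFac).minFac ∣ m :=
              (Nat.minFac_dvd _).trans (Nat.div_dvd_of_dvd hqd)
            have hpr : p ≤ (m / m.minFac).minFac := hqm _ hrp hrd
            have hle : (m / m.minFac).minFac ≤ m / m.minFac := Nat.minFac_le hr0
            nlinarith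
        have h1m : 1 < m := hmprime.one_lt
        rw [if_pos h1m, Nat.mul_div_cancel _ hm]
        have hco : Nat.Coprime c m := by
          rcases (Nat.coprime_or_dvd_of_prime hmprime c) with h | h
          · exact h.symm
          · exfalso
            have := hqc m hmprime h
            have := hqm m hmprime dvd_rfl
            omega
        rw [Nat.totient_mul hco, Nat.totient_prime hmprime]
        have hle : c.totient ≤ c.totient * m := Nat.le_mul_of_pos_right _ hm
        zify [hle, le_of_lt h1m]
        ring
    · simp only [phiLoopN, if_neg hbrk]
      by_cases hmod : m % p = 0
      · rw [if_pos hmod]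
        have hpd : p ∣ m := Nat.dvd_of_mod_eq_zero hmod
        have hpp : p.Prime := by
          have hq := Nat.minFac_prime (show p ≠ 1 by omega)
          have hd : p.minFac ∣ m := (Nat.minFac_dvd p).trans hpd
          have h1 := hqm p.minFac hq hd
          have h2 := Nat.minFac_le (show 0 < p by omega)
          have h3 : p.minFac = p := by omega
          rw [← h3]; exact hq
        obtain ⟨e, hme, hnd, hd0⟩ := phiDivN_spec p hp m hm
        set d := phiDivN m p with hdd
        have he1 : 1 ≤ e := by
          rcases Nat.eq_zero_or_pos e with he0 | h
          · exfalso; rw [he0, pow_zero, one_mul] at hme; rw [← hme] at hnd; exact hnd hpd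
          · exact h
        obtain ⟨E, rfl⟩ : ∃ E, e = E + 1 := ⟨e - 1, by omega⟩
        have hpc : ¬ p ∣ c := fun h => by have := hqc p hpp h; omega
        have hcop : Nat.Coprime c (p ^ (E + 1)) :=
          Nat.Coprime.pow_right _ ((Nat.Prime.coprime_iff_not_dvd hpp).mpr hpc).symm
        have hmE : m = p * (p ^ E * d) := by rw [hme]; ring
        have hmp : c.totient * m / p = c.totient * (p ^ E * d) := by
          conv_lhs => rw [hmE]
          rw [show c.totient * (p * (p ^ E * d)) =
            p * (c.totient * (p ^ E * d)) by ring,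
            Nat.mul_div_cancel_left _ (show 0 < p by omega)]
        have hres : c.totient * m - c.totient * m / p = (c * p ^ (E + 1)).totient * d := by
          rw [Nat.totient_mul hcop, Nat.totient_prime_pow hpp (by omega), hmp]
          have hle : c.totient * (p ^ E * d) ≤ c.totient * m := by
            apply Nat.mul_le_mul_left
            nlinarith [pow_pos (show 0 < p by omega) E, hd0, hmE]
          zify [hle, show 1 ≤ p by omega]
          rw [show (m : Int) = (p : Int) * ((p : Int) ^ E * (d : Int)) by exact_mod_cast hmE]
          push_cast [Nat.add_sub_cancel]
          ring
        rw [hres]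
        have hdm : d ∣ m := ⟨p ^ (E + 1), by rw [hme]; ring⟩
        have hgoal := ih (p + 1) (c * p ^ (E + 1)) d (by omega) hd0
          (by have := Nat.le_of_dvd hm hdm; omega)
          (by positivity)
          (by
            intro q hq hqd
            have h1 := hqm q hq (hqd.trans hdm)
            rcases Nat.lt_or_ge p q with h | h
            · omega
            · exfalso
              have : q = p := by omega
              rw [this] at hqd
              exact hnd hqd)
          (by
            intro q hq hqd
            rcases (Nat.Prime.dvd_mul hq).mp hqd with h | h
            · have := hqc q hq h; omega
            · have := (Nat.prime_dvd_prime_iff_eq hq hpp).mp (hq.dvd_of_dvd_pow h)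
              omega)
        rw [hgoal, mul_assoc, ← hme]
      · rw [if_neg hmod]
        exact ih (p + 1) c m (by omega) hm (by omega) hc
          (by
            intro q hq hqd
            have h1 := hqm q hq hqd
            rcases Nat.lt_or_ge p q with h | h
            · omega
            · exfalso
              have : q = p := by omega
              rw [this] at hqd
              exact hmod (Nat.mod_eq_zero_of_dvd hqd))
          (by intro q hq hqd; have := hqc q hq hqd; omega)

theorem post_cast (r m2 : Nat) :
    (if 1 < (m2 : Int) then (r : Int) - PySem.Int.floordiv (r : Int) (m2 : Int) else (r : Int)) =
      ((if 1 < m2 then r - r / m2 else r : Nat) : Int) := by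
  by_cases h : 1 < m2
  · rw [if_pos (by exact_mod_cast h), if_pos h,
      show PySem.Int.floordiv (r : Int) (m2 : Int) = ((r / m2 : Nat) : Int) from
        PySem.Int.floordiv_natCast r m2,
      Int.natCast_sub (Nat.div_le_self r m2)]
  · rw [if_neg (by exact_mod_cast h), if_neg h]

theorem phiB_totient (n : Int) (hn : 0 ≤ n) : phiB n = (Nat.totient n.toNat : Int) := by
  obtain ⟨N, rfl⟩ := Int.eq_ofNat_of_zero_le hn
  rw [Int.toNat_natCast]
  by_cases h2 : 2 ≤ N
  · have hrange : ((N : Int) + 1) = (((2 + (N - 1)) : Nat) : Int) := by push_cast; omega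
    have hP : (2 : Int) = ((2 : Nat) : Int) := by norm_num
    simp only [phiB, hrange, hP, phiLoopB_natCast, post_cast]
    have hmain := phiLoopN_correct (N - 1) 2 1 N le_rfl (by omega) (by omega) one_pos
      (fun q hq _ => hq.two_le)
      (fun q hq hd => by
        have := Nat.le_of_dvd one_pos hd
        have := hq.two_le
        omega)
    simp only [Nat.totient_one, one_mul] at hmain
    exact_mod_cast congrArg (Nat.cast : Nat → Int) hmain
  · interval_cases N
    · simp only [Nat.cast_zero, Nat.totient_zero, phiB]
      rw [phiLoopB, dif_neg (by norm_num)]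
      norm_num
    · simp only [Nat.cast_one, Nat.totient_one, phiB]
      rw [phiLoopB, dif_neg (by norm_num)]
      norm_num

theorem phi_eq (n : Int) (hn : 0 ≤ n) : phi_funcA n = phiB n := by
  rw [phi_funcA_totient n hn, phiB_totient n hn]

-- outer loops agree
theorem loop_eq_aux (x y : Int) : ∀ (k : Nat) (n : Int) (acc : List Int), 0 ≤ n →
    (x * x - n).toNat ≤ k →
    loopA x y acc n = loopB x y acc n (x * x) := by
  intro k
  induction k with
  | zero =>
    intro n acc hn hk
    rw [loopA, dif_neg (by rintro ⟨-, h⟩; omega), loopB, dif_neg (by omega)]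
  | succ k ih =>
    intro n acc hn hk
    by_cases hlt : n < x * x
    · rw [loopA, loopB, dif_pos hlt]
      by_cases hy : (acc.length : Int) < y
      · have hsw : (if x = phi_funcA n then acc ++ [n] else acc) =
            (if phiB n = x then acc ++ [n] else acc) := by
          rw [phi_eq n hn]
          by_cases h : phiB n = x
          · rw [if_pos h.symm, if_pos h]
          · rw [if_neg (fun hc => h hc.symm), if_neg h]
        rw [dif_pos ⟨hy, hlt⟩, hsw, if_neg (show ¬ y ≤ (acc.length : Int) by omega)]
        exact ih (n + 1) _ (by omega) (by omega)
      · rw [dif_neg (by rintro ⟨h, -⟩; omega), if_pos (by omega)]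
    · rw [loopA, dif_neg (by rintro ⟨-, h⟩; omega), loopB, dif_neg (by omega)]

theorem loop_eq (x y : Int) : ∀ (n : Int) (acc : List Int), 0 ≤ n →
    loopA x y acc n = loopB x y acc n (x * x) := by
  intro n acc hn
  exact loop_eq_aux x y ((x * x - n).toNat) n acc hn le_rfl

-- ===== VERDICT (by name: the statement is the Claim_ definition above) =====
theorem phi_counting_spec : Claim_equal_phi_counting := by
  intro x y _
  unfold Spec_phi_counting phi_counting phi_counting_alt
  exact loop_eq x y 0 [] le_rfl
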